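-- pv_equiv track=rewrite | github.com/team-BBaBam-BBaBam/bbabam | bbabam/modules/relevance_estimator.py | list_compare
-- ===== SOURCE A (Python) =====
-- def list_compare(target, source):
--     targetchar = "".join(str(word) for word in target)
--     sourcechar = "".join(str(word) for word in source)
--     location_list = []
--     for i in range(len(source)):
--         if sourcechar[: len(targetchar)] == targetchar:
--             location_list.append(i)
--         sourcechar = sourcechar[len(str(source[i])) :]
--     return location_list
-- ===== SOURCE B (Python) =====
-- def list_compare(target, source):
--     targetchar = "".join(str(word) for word in target)
--     sourcechar = "".join(str(word) for word in source)
--     # all start positions of targetchar inside sourcechar, found with C-level str.find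
--     occ = set()
--     pos = sourcechar.find(targetchar)
--     while pos != -1:
--         occ.add(pos)
--         pos = sourcechar.find(targetchar, pos + 1)
--     # word-start offsets; keep the indices whose offset is an occurrence
--     location_list = []
--     offset = 0
--     for i, word in enumerate(source):
--         if offset in occ:
--             location_list.append(i)
--         offset += len(str(word))
--     return location_list
-- ===== Notes on version B (the rewrite author's own statement) =====
-- stated objective: faster
-- what changed: Instead of re-slicing the joined source string on every word and comparing its prefix (quadratic in the total source length), B joins once, collects all occurrence positions of the joined target with C-level str.find in one scan, and then keeps the indices whose cumulative word offset is an occurrence.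
import Mathlib
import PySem

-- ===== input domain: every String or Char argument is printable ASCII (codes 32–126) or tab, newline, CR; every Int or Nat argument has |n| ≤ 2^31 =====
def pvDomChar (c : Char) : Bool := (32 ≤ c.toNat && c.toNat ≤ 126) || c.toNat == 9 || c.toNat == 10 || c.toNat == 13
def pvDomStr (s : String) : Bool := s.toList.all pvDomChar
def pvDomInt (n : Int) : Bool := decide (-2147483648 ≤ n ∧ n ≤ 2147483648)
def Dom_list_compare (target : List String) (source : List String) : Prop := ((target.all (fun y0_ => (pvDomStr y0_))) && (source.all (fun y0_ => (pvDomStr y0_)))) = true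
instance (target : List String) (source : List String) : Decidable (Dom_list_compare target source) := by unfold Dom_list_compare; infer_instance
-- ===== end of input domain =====

-- B replaces A's quadratic suffix-slicing loop by one pass of C-level str.find collecting
-- all occurrence positions of the joined target, then keeps the word offsets that occur.

-- ===== PORT A =====
-- A's loop "for i in range(len(source))" walks the words with their index i, carrying the
-- shrinking sourcechar; str(word) is the identity on strings, so "".join(str(w)…) is join.
def aLoop (targetchar : List Char) (src : List String) (i : Nat) (sourcechar : List Char)
    (acc : List Int) : List Int :=
  match src with
  | [] => acc
  | w :: rest =>
      let acc' := if PySem.Chars.slice sourcechar none (some ((targetchar.length : Int)))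
                     = targetchar then acc ++ [(i : Int)] else acc
      aLoop targetchar rest (i + 1)
        (PySem.Chars.slice sourcechar (some (PySem.Str.len w)) none) acc'

def list_compare (target : List String) (source : List String) : List Int :=
  let targetchar := (PySem.Str.join "" target).toList
  let sourcechar := (PySem.Str.join "" source).toList
  aLoop targetchar source 0 sourcechar []

-- ===== PORT B =====
-- start past the end finds nothing (CPython quirk, kept by PySem.Chars.findFrom)
theorem findFrom_eq_neg_one_of_lt (s t : List Char) (k : Nat) (h : s.length < k) :
    PySem.Chars.findFrom s t (k : Int) none = -1 := by
  simp only [PySem.Chars.findFrom]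
  norm_num
  intro h2
  omega

-- the Python while loop: pos = s.find(t, start); while pos != -1: occ.add(pos); start = pos+1
def occLoop (s t : List Char) (start : Nat) (occ : PySem.Set Int) : PySem.Set Int :=
  let p := PySem.Chars.findFrom s t (start : Int) none
  if hp : p = -1 then occ
  else occLoop s t (p.toNat + 1) (PySem.Set.add occ p)
termination_by s.length + 1 - start
decreasing_by
  have hks : start ≤ s.length := by
    by_contra hc
    exact hp (findFrom_eq_neg_one_of_lt s t start (by omega))
  have hspec := PySem.Chars.findFrom_natCast_spec s t start hks hp
  omega

-- the second loop: for i, word in enumerate(source): keep i when its offset is an occurrence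
def bLoop (occ : PySem.Set Int) (src : List String) (i : Nat) (offset : Int)
    (acc : List Int) : List Int :=
  match src with
  | [] => acc
  | w :: rest =>
      bLoop occ rest (i + 1) (offset + PySem.Str.len w)
        (if PySem.Set.contains occ offset then acc ++ [(i : Int)] else acc)

def list_compare_alt (target : List String) (source : List String) : List Int :=
  let t := (PySem.Str.join "" target).toList
  let s := (PySem.Str.join "" source).toList
  let occ := occLoop s t 0 PySem.Set.empty
  bLoop occ source 0 0 []

-- ===== PRECONDITION & SPEC =====
def Spec_list_compare (target : List String) (source : List String) (out : List Int) : Prop := out = list_compare_alt target source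
instance (target : List String) (source : List String) (out : List Int) : Decidable (Spec_list_compare target source out) := by unfold Spec_list_compare; infer_instance

-- ===== CLAIM (what is proved, stated in full; the proofs are below) =====
def Claim_equal_list_compare : Prop := ∀ (target : List String) (source : List String), Dom_list_compare target source → Spec_list_compare target source (list_compare target source)

-- ===== LEMMAS AND PROOFS =====

theorem findFrom_le_length (s t : List Char) (k : Nat) (hk : k ≤ s.length) :
    PySem.Chars.findFrom s t (k : Int) none ≤ s.length := by
  rw [PySem.Chars.findFrom_natCast s t k hk]
  split_ifs with h
  · omega
  · have := PySem.Chars.find_le_length (s.drop k) t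
    simp only [List.length_drop] at this
    omega

theorem infix_of_prefix_drop {t u : List Char} (m : Nat) (h : t <+: u.drop m) : t <:+: u := by
  obtain ⟨r, hr⟩ := h
  obtain ⟨w, hw⟩ := List.drop_suffix m u
  exact ⟨w, r, by rw [← hw, ← hr]; simp⟩

-- what the find loop collects: every occurrence position from `start` on
theorem mem_occLoop (s t : List Char) (start : Nat) (occ : PySem.Set Int) (x : Int) :
    x ∈ occLoop s t start occ ↔
      x ∈ occ ∨ ∃ j : Nat, start ≤ j ∧ j ≤ s.length ∧ t <+: s.drop j ∧ x = (j : Int) := by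
  fun_induction occLoop s t start occ with
  | case1 start occ p hp =>
      constructor
      · exact Or.inl
      · rintro (h | ⟨j, hsj, hjl, hpre, rfl⟩)
        · exact h
        · exfalso
          have hks : start ≤ s.length := le_trans hsj hjl
          have hni := (PySem.Chars.findFrom_natCast_eq_neg_one_iff s t start hks).mp hp
          apply hni
          have : t <+: (s.drop start).drop (j - start) := by
            rw [List.drop_drop]
            rwa [show start + (j - start) = j by omega]
          exact infix_of_prefix_drop (j - start) this
  | case2 start occ p hp ih =>
      have hks : start ≤ s.length := by
        by_contra hc
        exact hp (findFrom_eq_neg_one_of_lt s t start (by omega))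
      have hspec := PySem.Chars.findFrom_natCast_spec s t start hks hp
      have hle := findFrom_le_length s t start hks
      have hp0 : (0:Int) ≤ p := le_trans (by exact_mod_cast Nat.zero_le start) hspec.1
      have hpcast : ((p.toNat : Nat) : Int) = p := Int.toNat_of_nonneg hp0
      rw [ih, PySem.Set.mem_add]
      constructor
      · rintro ((h | rfl) | ⟨j, hsj, hjl, hpre, rfl⟩)
        · exact Or.inl h
        · exact Or.inr ⟨p.toNat, by omega, by omega, hspec.2.1, hpcast.symm⟩
        · exact Or.inr ⟨j, by omega, hjl, hpre, rfl⟩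
      · rintro (h | ⟨j, hsj, hjl, hpre, rfl⟩)
        · exact Or.inl (Or.inl h)
        · rcases lt_trichotomy j p.toNat with hlt | rfl | hgt
          · exact absurd hpre (hspec.2.2 j hsj hlt)
          · exact Or.inl (Or.inr hpcast)
          · exact Or.inr ⟨j, by omega, hjl, hpre, rfl⟩

theorem join_empty_eq_flatten (l : List String) :
    (PySem.Str.join "" l).toList = (l.map String.toList).flatten := by
  rw [PySem.Str.toList_join]
  show PySem.Chars.join [] _ = _
  simp only [PySem.Chars.join, List.intercalate]
  induction (l.map String.toList) with
  | nil => rfl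
  | cons x xs ih => cases xs <;> simp_all [List.intersperse]

theorem loops_eq (t s : List Char) (occ : PySem.Set Int)
    (hocc : ∀ x, x ∈ occ ↔ ∃ j : Nat, j ≤ s.length ∧ t <+: s.drop j ∧ x = (j : Int)) :
    ∀ (src : List String) (i : Nat) (acc : List Int) (off : Nat),
      off + (src.map (fun w => w.toList.length)).sum = s.length →
      aLoop t src i (s.drop off) acc = bLoop occ src i (off : Int) acc := by
  intro src
  induction src with
  | nil => intro i acc off _; rfl
  | cons w rest ih =>
      intro i acc off hsum
      simp only [List.map_cons, List.sum_cons] at hsum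
      have hoff : off ≤ s.length := by omega
      rw [aLoop, bLoop]
      have hcond : (PySem.Chars.slice (s.drop off) none (some ((t.length : Int))) = t)
          ↔ (PySem.Set.contains occ (off : Int) = true) := by
        rw [PySem.Set.contains_iff, hocc]
        rw [PySem.Chars.slice_eq_listSlice, PySem.List.slice_to_natCast]
        constructor
        · intro h
          exact ⟨off, hoff, (List.prefix_iff_eq_take).mpr h.symm, rfl⟩
        · rintro ⟨j, hjl, hpre, hj⟩
          have : j = off := by exact_mod_cast hj.symm
          subst this
          exact ((List.prefix_iff_eq_take).mp hpre).symm
      have hnext : PySem.Chars.slice (s.drop off) (some (PySem.Str.len w)) none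
          = s.drop (off + w.toList.length) := by
        rw [PySem.Chars.slice_eq_listSlice]
        show PySem.List.slice _ (some ((w.toList.length : Nat) : Int)) none = _
        rw [PySem.List.slice_from_natCast, List.drop_drop, Nat.add_comm]
      have hcast : (off : Int) + PySem.Str.len w = ((off + w.toList.length : Nat) : Int) := by
        show (off : Int) + ((w.toList.length : Nat) : Int) = _
        push_cast; ring
      rw [hnext, hcast]
      by_cases hc : PySem.Set.contains occ (off : Int) = true
      · rw [if_pos (hcond.mpr hc), if_pos hc]
        exact ih (i+1) (acc ++ [(i:Int)]) (off + w.toList.length) (by omega)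
      · rw [if_neg (fun h => hc (hcond.mp h)), if_neg hc]
        exact ih (i+1) acc (off + w.toList.length) (by omega)

-- ===== VERDICT (by name: the statement is the Claim_ definition above) =====
theorem list_compare_spec : Claim_equal_list_compare := by
  intro target source _
  unfold Spec_list_compare list_compare list_compare_alt
  simp only
  rw [show ((PySem.Str.join "" source).toList = List.drop 0 (PySem.Str.join "" source).toList) by simp]
  rw [show ((0 : Int) = ((0 : Nat) : Int)) by simp]
  apply loops_eq
  · intro x
    rw [mem_occLoop]
    simp [PySem.Set.empty]
  · rw [join_empty_eq_flatten]
    simp only [List.length_flatten, List.map_map, Nat.zero_add]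
    rfl
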